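-- pv_equiv track=rewrite | github.com/Haro-M/KGDist | KnowBERT/distill_n.py | split_array_into_n_sections
-- ===== SOURCE A (Python) =====
-- def split_array_into_n_sections(range_, n):
--     section_size = range_ // n
--     remainder = range_ % n
--
--     result = []
--     head = 0
--
--     for i in range(n):
--         tail = head + section_size
--         if i < remainder:
--             tail += 1
--         result.append([head, tail])
--         head = tail
--
--     return result
-- ===== SOURCE B (Python) =====
-- def split_array_into_n_sections(range_, n):
--     section_size = range_ // n
--     remainder = range_ % n
--     return [[i * section_size + min(i, remainder),
--              (i + 1) * section_size + min(i + 1, remainder)]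
--             for i in range(n)]
-- ===== Notes on version B (the rewrite author's own statement) =====
-- stated objective: simpler
-- what changed: Replaced the running head accumulator and the i<remainder branch by a closed-form per-index formula start = i*size + min(i, remainder), emitted by a single comprehension.
import Mathlib
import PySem

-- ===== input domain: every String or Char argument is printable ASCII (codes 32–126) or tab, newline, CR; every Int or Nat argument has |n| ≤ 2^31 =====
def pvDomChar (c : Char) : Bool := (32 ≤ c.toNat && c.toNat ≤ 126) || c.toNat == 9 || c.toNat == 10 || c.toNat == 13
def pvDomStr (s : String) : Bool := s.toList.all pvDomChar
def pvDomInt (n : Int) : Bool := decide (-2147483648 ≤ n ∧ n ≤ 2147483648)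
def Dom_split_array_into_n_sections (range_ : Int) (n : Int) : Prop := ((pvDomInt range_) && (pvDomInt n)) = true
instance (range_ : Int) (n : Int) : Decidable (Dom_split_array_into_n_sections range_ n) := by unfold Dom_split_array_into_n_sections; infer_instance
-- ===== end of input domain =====

-- B replaces A's running head accumulator by a closed-form per-index start/end formula (objective: simpler).

-- ===== PORT A =====
def split_array_into_n_sections (range_ : Int) (n : Int) : List (List Int) :=
  let section_size := PySem.Int.floordiv range_ n
  let remainder := PySem.Int.mod range_ n
  let st := (PySem.List.pyRange 0 n 1).foldl
    (fun (st : List (List Int) × Int) i =>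
      let tail0 := st.2 + section_size
      let tail := if i < remainder then tail0 + 1 else tail0
      (st.1 ++ [[st.2, tail]], tail))
    ([], 0)
  st.1

-- ===== PORT B =====
def split_array_into_n_sections_alt (range_ : Int) (n : Int) : List (List Int) :=
  let section_size := PySem.Int.floordiv range_ n
  let remainder := PySem.Int.mod range_ n
  (PySem.List.pyRange 0 n 1).map
    (fun i => [i * section_size + min i remainder,
               (i + 1) * section_size + min (i + 1) remainder])

-- ===== PRECONDITION & SPEC =====
-- A raises ZeroDivisionError on n = 0 (range_ // n); B raises there too, so n = 0 is excluded.
def Pre_split_array_into_n_sections (range_ : Int) (n : Int) : Prop := n ≠ 0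
instance (range_ : Int) (n : Int) : Decidable (Pre_split_array_into_n_sections range_ n) := by
  unfold Pre_split_array_into_n_sections; infer_instance

def pvWitness_split_array_into_n_sections : Int × Int := (10, 3)

def Spec_split_array_into_n_sections (range_ : Int) (n : Int) (out : List (List Int)) : Prop :=
  out = split_array_into_n_sections_alt range_ n
instance (range_ : Int) (n : Int) (out : List (List Int)) :
    Decidable (Spec_split_array_into_n_sections range_ n out) := by
  unfold Spec_split_array_into_n_sections; infer_instance

-- ===== CLAIM (what is proved, stated in full; the proofs are below) =====
def Claim_equal_split_array_into_n_sections : Prop :=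
  ∀ (range_ : Int) (n : Int), Dom_split_array_into_n_sections range_ n →
    Pre_split_array_into_n_sections range_ n →
    Spec_split_array_into_n_sections range_ n (split_array_into_n_sections range_ n)

-- ===== LEMMAS AND PROOFS =====

-- Loop invariant: starting the fold at index a with head = a*s + min a r and accumulator acc,
-- it produces acc ++ the closed-form sections for indices a..b-1, and the final head.
theorem pv_loop_eq (s r : Int) :
    ∀ (k : Nat) (a b : Int), 0 ≤ a → b - a = (k : Int) →
    ((PySem.List.pyRange a b 1).foldl
      (fun (st : List (List Int) × Int) i =>
        let tail0 := st.2 + s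
        let tail := if i < r then tail0 + 1 else tail0
        (st.1 ++ [[st.2, tail]], tail))
      (acc, a * s + min a r))
    = (acc ++ (PySem.List.pyRange a b 1).map
        (fun i => [i * s + min i r, (i + 1) * s + min (i + 1) r]),
       b * s + min b r) := by
  intro k
  induction k generalizing acc with
  | zero =>
    intro a b _ hk
    have hba : b = a := by omega
    rw [PySem.List.pyRange_one_eq_nil (by omega), hba]
    simp
  | succ m ih =>
    intro a b ha hk
    have hab : a < b := by omega
    rw [PySem.List.pyRange_one_cons hab]
    simp only [List.foldl_cons, List.map_cons]
    have htail : (if a < r then a * s + min a r + s + 1 else a * s + min a r + s)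
        = (a + 1) * s + min (a + 1) r := by
      have hmin : min (a + 1) r = if a < r then min a r + 1 else min a r := by
        split_ifs with h <;> omega
      rw [add_one_mul, hmin]
      split_ifs with h <;> ring
    simp only [htail]
    have := ih (acc := acc ++ [[a * s + min a r, (a + 1) * s + min (a + 1) r]])
      (a + 1) b (by omega) (by omega)
    simp only [List.append_assoc] at this ⊢
    exact this

-- ===== VERDICT (by name: the statement is the Claim_ definition above) =====
theorem split_array_into_n_sections_spec : Claim_equal_split_array_into_n_sections := by
  intro range_ n _ hn
  unfold Spec_split_array_into_n_sections split_array_into_n_sections split_array_into_n_sections_alt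
  rcases lt_or_gt_of_ne hn with hneg | hpos
  · simp [PySem.List.pyRange_one_eq_nil (by omega : n ≤ 0)]
  · have hr : 0 ≤ PySem.Int.mod range_ n := PySem.Int.mod_nonneg range_ hpos
    have h0 : (0 : Int) * PySem.Int.floordiv range_ n + min 0 (PySem.Int.mod range_ n) = 0 := by
      simp [min_eq_left hr]
    simp only
    rw [show ((([] : List (List Int)), (0 : Int)))
        = (([] : List (List Int)),
           0 * PySem.Int.floordiv range_ n + min 0 (PySem.Int.mod range_ n)) by rw [h0]]
    rw [pv_loop_eq (PySem.Int.floordiv range_ n) (PySem.Int.mod range_ n)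
      n.toNat 0 n (le_refl 0) (by omega)]
    simp
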